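-- pv_equiv track=rewrite | github.com/ChrisKoll/Goethe-Universitaet-iGEM2023 | projects/VbrK_promotor/promoter alignments/binding.py | seq_search
-- ===== SOURCE A (Python) =====
-- def mismatches(seq1, seq2):
--     """counts number of mismatches in two equal length sequences (gaps dont count)"""
--
--     #check if sequences are equal length
--     if len(seq1) != len(seq2):
--         return -1
--
--     mismatches = 0
--
--     #check each position in string for a mismatch
--     for i in range(len(seq1)):
--         #ignore gaps
--         if seq1[i] == "_" or seq2[i] == "_":
--             continue
--
--         if seq1[i] != seq2[i]:
--             mismatches += 1
--
--     return mismatches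
--
-- def seq_search(sequence, gap_min, gap_max, s1, s2, allowed_mismatch):
--     """searches sequence for all ocurrences of s1 and s2"""
--
--     #list of matching substrings and the matching query
--     return_seqs = []
--
--     for gap_num in range(gap_min, gap_max+1):
--         #construct complete query with desired gapcount
--         query = s1 + "_"*gap_num + s2
--
--         #check all possible substrings of sequence for query
--         for i in range(len(sequence) - len(query) + 1):
--             subject = sequence[i:i+len(query)]
--             mismatch = mismatches(subject, query)
--             if mismatch <= allowed_mismatch:
--                 return_seqs.append((subject, query, i, mismatch))
--
--     return return_seqs
-- ===== SOURCE B (Python) =====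
-- def seq_search(sequence, gap_min, gap_max, s1, s2, allowed_mismatch):
--     """searches sequence for all ocurrences of s1 and s2"""
--     n = len(sequence)
--
--     def profile(pat):
--         # prof[i] = number of mismatches of pat against sequence[i:i+len(pat)]
--         # ('_' on either side never counts as a mismatch)
--         return [sum(a != '_' and b != '_' and a != b
--                     for a, b in zip(pat, sequence[i:i + len(pat)]))
--                 for i in range(n - len(pat) + 1)]
--
--     p1 = profile(s1)
--     p2 = profile(s2)
--
--     results = []
--     for gap_num in range(gap_min, gap_max + 1):
--         query = s1 + "_" * gap_num + s2
--         qlen = len(query)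
--         # within a window, s1 aligns at its start and s2 at its end;
--         # the gap characters never mismatch, so two profile lookups suffice
--         for i in range(n - qlen + 1):
--             mismatch = p1[i] + p2[i + qlen - len(s2)]
--             if mismatch <= allowed_mismatch:
--                 results.append((sequence[i:i + qlen], query, i, mismatch))
--     return results
-- ===== Notes on version B (the rewrite author's own statement) =====
-- stated objective: alternative
-- what changed: B precomputes, once, a per-start-position mismatch profile of s1 and of s2 against the sequence, then scores each (gap, position) candidate with two profile lookups instead of A's full window rescan via the mismatches helper.
import Mathlib
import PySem

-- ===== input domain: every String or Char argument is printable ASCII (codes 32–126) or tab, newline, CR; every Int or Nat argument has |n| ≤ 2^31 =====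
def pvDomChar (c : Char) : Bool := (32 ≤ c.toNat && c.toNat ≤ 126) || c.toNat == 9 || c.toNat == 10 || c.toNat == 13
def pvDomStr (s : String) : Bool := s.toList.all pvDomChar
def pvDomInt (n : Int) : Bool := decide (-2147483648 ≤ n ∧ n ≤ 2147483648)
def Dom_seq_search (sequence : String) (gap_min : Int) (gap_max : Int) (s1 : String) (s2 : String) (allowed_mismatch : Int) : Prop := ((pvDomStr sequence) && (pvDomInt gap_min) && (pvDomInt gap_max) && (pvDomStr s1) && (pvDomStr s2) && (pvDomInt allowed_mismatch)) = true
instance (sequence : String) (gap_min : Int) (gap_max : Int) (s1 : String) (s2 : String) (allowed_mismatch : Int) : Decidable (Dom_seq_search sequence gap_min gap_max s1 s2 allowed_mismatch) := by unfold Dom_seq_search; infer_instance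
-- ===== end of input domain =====

-- B precomputes one mismatch profile per pattern (s1 and s2) against the sequence and scores each
-- candidate window with two lookups, replacing A's per-candidate rescan; return values proved equal.

-- ===== PORT A =====
-- port of helper 'mismatches' (on the char-list side; the port calls it on the slice and query lists)
def mismatchesA (seq1 seq2 : List Char) : Int :=
  if seq1.length ≠ seq2.length then -1
  else
    (PySem.List.pyRange 0 (seq1.length : Int) 1).foldl
      (fun m i =>
        if PySem.List.pyGetD seq1 i ' ' = '_' ∨ PySem.List.pyGetD seq2 i ' ' = '_' then m
        else if PySem.List.pyGetD seq1 i ' ' ≠ PySem.List.pyGetD seq2 i ' ' then m + 1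
        else m) 0

def seq_search (sequence : String) (gap_min : Int) (gap_max : Int) (s1 : String) (s2 : String) (allowed_mismatch : Int) : List (String × String × Int × Int) :=
  let seq := sequence.toList
  (PySem.List.pyRange gap_min (gap_max + 1) 1).foldl
    (fun acc gap_num =>
      -- query = s1 + "_"*gap_num + s2
      let query := s1.toList ++ PySem.List.pyRepeat ['_'] gap_num ++ s2.toList
      (PySem.List.pyRange 0 ((seq.length : Int) - (query.length : Int) + 1) 1).foldl
        (fun acc i =>
          let subject := PySem.List.slice seq (some i) (some (i + (query.length : Int)))
          let mismatch := mismatchesA subject query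
          if mismatch ≤ allowed_mismatch then
            acc ++ [(String.ofList subject, String.ofList query, i, mismatch)]
          else acc) acc) []

-- ===== PORT B =====
-- port of Source B's 'profile': prof[i] = mismatches of pat against sequence[i:i+len(pat)] ('_' ignored)
def profileB (seq pat : List Char) : List Int :=
  (PySem.List.pyRange 0 ((seq.length : Int) - (pat.length : Int) + 1) 1).map
    (fun i =>
      ((pat.zip (PySem.List.slice seq (some i) (some (i + (pat.length : Int))))).map
        (fun p => if p.1 ≠ '_' ∧ p.2 ≠ '_' ∧ p.1 ≠ p.2 then (1 : Int) else 0)).sum)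

def seq_search_alt (sequence : String) (gap_min : Int) (gap_max : Int) (s1 : String) (s2 : String) (allowed_mismatch : Int) : List (String × String × Int × Int) :=
  let seq := sequence.toList
  let n : Int := seq.length
  let p1 := profileB seq s1.toList
  let p2 := profileB seq s2.toList
  (PySem.List.pyRange gap_min (gap_max + 1) 1).foldl
    (fun acc gap_num =>
      let query := s1.toList ++ PySem.List.pyRepeat ['_'] gap_num ++ s2.toList
      let qlen : Int := query.length
      (PySem.List.pyRange 0 (n - qlen + 1) 1).foldl
        (fun acc i =>
          let mismatch := PySem.List.pyGetD p1 i 0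
            + PySem.List.pyGetD p2 (i + qlen - (s2.toList.length : Int)) 0
          if mismatch ≤ allowed_mismatch then
            acc ++ [(String.ofList (PySem.List.slice seq (some i) (some (i + qlen))), String.ofList query, i, mismatch)]
          else acc) acc) []

-- ===== PRECONDITION & SPEC =====
def Spec_seq_search (sequence : String) (gap_min : Int) (gap_max : Int) (s1 : String) (s2 : String) (allowed_mismatch : Int) (out : List (String × String × Int × Int)) : Prop := out = seq_search_alt sequence gap_min gap_max s1 s2 allowed_mismatch
instance (sequence : String) (gap_min : Int) (gap_max : Int) (s1 : String) (s2 : String) (allowed_mismatch : Int) (out : List (String × String × Int × Int)) : Decidable (Spec_seq_search sequence gap_min gap_max s1 s2 allowed_mismatch out) := by unfold Spec_seq_search; infer_instance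

-- ===== CLAIM (what is proved, stated in full; the proofs are below) =====
def Claim_equal_seq_search : Prop := ∀ (sequence : String) (gap_min : Int) (gap_max : Int) (s1 : String) (s2 : String) (allowed_mismatch : Int), Dom_seq_search sequence gap_min gap_max s1 s2 allowed_mismatch → Spec_seq_search sequence gap_min gap_max s1 s2 allowed_mismatch (seq_search sequence gap_min gap_max s1 s2 allowed_mismatch)

-- ===== LEMMAS AND PROOFS =====

-- the common mismatch count, structurally
def cnt : List Char → List Char → Int
  | x :: xs, y :: ys => (if x = '_' ∨ y = '_' then 0 else if x ≠ y then 1 else 0) + cnt xs ys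
  | _, _ => 0

lemma cnt_nil_right (xs : List Char) : cnt xs [] = 0 := by cases xs <;> rfl

lemma cnt_append (x y a b : List Char) (h : x.length = a.length) :
    cnt (x ++ y) (a ++ b) = cnt x a + cnt y b := by
  induction x generalizing a with
  | nil => cases a with
    | nil => simp [cnt]
    | cons _ _ => simp at h
  | cons hd tl ih =>
    cases a with
    | nil => simp at h
    | cons ha ta =>
      simp only [List.length_cons, Nat.add_right_cancel_iff] at h
      simp only [List.cons_append, cnt, ih ta h]
      ring

lemma cnt_gap (w : List Char) (g : Nat) : cnt w (List.replicate g '_') = 0 := by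
  induction g generalizing w with
  | zero => simpa using cnt_nil_right w
  | succ n ih =>
    cases w with
    | nil => rfl
    | cons hd tl => simp [List.replicate, cnt, ih]

-- a two-list indexed fold over range(len) is a fold over the zip (generic shift lemma)
lemma foldl_pyRange_two (f : Int → Char → Char → Int) (d : Char) :
    ∀ (a b : List Char) (init : Int), b.length = a.length →
    (PySem.List.pyRange 0 (a.length : Int) 1).foldl
      (fun c j => f c (PySem.List.pyGetD a j d) (PySem.List.pyGetD b j d)) init
    = (a.zip b).foldl (fun c p => f c p.1 p.2) init := by
  intro a
  induction a with
  | nil => intro b init h; rw [List.length_eq_zero_iff.mp h]; simp [PySem.List.pyRange_one_eq_nil]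
  | cons x xs ih =>
    intro b init h
    cases b with
    | nil => simp at h
    | cons y ys =>
      simp only [List.length_cons, Nat.add_right_cancel_iff] at h
      rw [PySem.List.pyRange_one_cons (by exact_mod_cast xs.length.succ_pos)]
      simp only [List.foldl_cons, List.zip_cons_cons]
      rw [PySem.List.pyGetD_zero_cons, PySem.List.pyGetD_zero_cons]
      have hcast : (((x :: xs).length : Nat) : Int) = (xs.length : Int) + 1 := by
        simp
      rw [hcast]
      have hrange : PySem.List.pyRange (0 + 1) ((xs.length : Int) + 1) 1
          = (PySem.List.pyRange 0 (xs.length : Int) 1).map (· + 1) := by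
        rw [PySem.List.pyRange_one, PySem.List.pyRange_one, List.map_map]
        have e : ((xs.length : Int) + 1 - (0 + 1)).toNat = ((xs.length : Int) - 0).toNat := by
          omega
        rw [e]
        apply List.map_congr_left
        intro k _
        simp only [Function.comp_apply]
        omega
      rw [hrange, List.foldl_map]
      rw [← ih ys (f init x y) h]
      apply PySem.List.foldl_congr_mem
      intro acc j hj
      have hj' := (PySem.List.mem_pyRange_one).mp hj
      have e1 : PySem.List.pyGetD (x :: xs) (j + 1) d = PySem.List.pyGetD xs j d := by
        rw [PySem.List.pyGetD_eq_getElem (x :: xs) d (by omega) (by simp only [List.length_cons]; push_cast; omega),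
            PySem.List.pyGetD_eq_getElem xs d (by omega) (by omega)]
        have : (j + 1).toNat = j.toNat + 1 := by omega
        simp [this]
      have e2 : PySem.List.pyGetD (y :: ys) (j + 1) d = PySem.List.pyGetD ys j d := by
        rw [PySem.List.pyGetD_eq_getElem (y :: ys) d (by omega) (by simp only [List.length_cons]; push_cast; omega),
            PySem.List.pyGetD_eq_getElem ys d (by omega) (by omega)]
        have : (j + 1).toNat = j.toNat + 1 := by omega
        simp [this]
      rw [e1, e2]

-- A's step as a zip fold equals cnt
lemma foldl_zip_A (a b : List Char) :
    ∀ init : Int,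
    (a.zip b).foldl (fun m p => if p.1 = '_' ∨ p.2 = '_' then m else if p.1 ≠ p.2 then m + 1 else m) init
    = init + cnt a b := by
  induction a generalizing b with
  | nil => intro init; cases b <;> simp [cnt]
  | cons x xs ih =>
    intro init
    cases b with
    | nil => simp [cnt]
    | cons y ys =>
      simp only [List.zip_cons_cons, List.foldl_cons, cnt, ih]
      split_ifs <;> ring

-- B's per-pair 0/1 sum (pattern first) equals cnt (window, pattern)
lemma sum_zip_B (q w : List Char) :
    ((q.zip w).map (fun p => if p.1 ≠ '_' ∧ p.2 ≠ '_' ∧ p.1 ≠ p.2 then (1 : Int) else 0)).sum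
    = cnt w q := by
  induction q generalizing w with
  | nil => cases w <;> simp [cnt]
  | cons x xs ih =>
    cases w with
    | nil => simp [cnt]
    | cons y ys =>
      simp only [List.zip_cons_cons, List.map_cons, List.sum_cons, cnt, ih]
      by_cases h1 : x = '_' <;> by_cases h2 : y = '_' <;> by_cases h3 : x = y <;>
        · simp [h1, h2, h3, show (y = x) ↔ (x = y) from eq_comm]

-- A's mismatches on equal-length lists is cnt
lemma mismatchesA_eq_cnt (a b : List Char) (h : a.length = b.length) :
    mismatchesA a b = cnt a b := by
  unfold mismatchesA
  rw [if_neg (by omega)]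
  rw [foldl_pyRange_two (fun m c1 c2 => if c1 = '_' ∨ c2 = '_' then m else if c1 ≠ c2 then m + 1 else m) ' ' a b 0 h.symm]
  simpa using foldl_zip_A a b 0

-- B's profile entry at an in-range position is cnt (window, pattern)
lemma profile_entry (seq pat : List Char) (i : Int) (h0 : 0 ≤ i)
    (h1 : i + pat.length ≤ seq.length) :
    PySem.List.pyGetD (profileB seq pat) i 0
      = cnt ((seq.drop i.toNat).take pat.length) pat := by
  unfold profileB
  rw [PySem.List.pyGetD_map_pyRange_of_nonneg _ _ _ _ h0 (by omega)]
  have hslice : PySem.List.slice seq (some i) (some (i + (pat.length : Int)))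
      = (seq.drop i.toNat).take pat.length := by
    rw [PySem.List.slice_toNat _ h0 (by omega)]
    congr 1
    omega
  rw [hslice, sum_zip_B]

-- per (gap, position): A's mismatch value = B's two profile lookups
lemma mismatch_value_eq (seq l1 l2 : List Char) (g i : Int) (h0 : 0 ≤ i)
    (hfit : i + (l1.length : Int) + max g 0 + l2.length ≤ seq.length) :
    mismatchesA (PySem.List.slice seq (some i) (some (i + ((l1 ++ PySem.List.pyRepeat ['_'] g ++ l2).length : Int))))
        (l1 ++ PySem.List.pyRepeat ['_'] g ++ l2)
    = PySem.List.pyGetD (profileB seq l1) i 0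
      + PySem.List.pyGetD (profileB seq l2) (i + ((l1 ++ PySem.List.pyRepeat ['_'] g ++ l2).length : Int) - l2.length) 0 := by
  have hrep : PySem.List.pyRepeat ['_'] g = List.replicate g.toNat '_' :=
    PySem.List.pyRepeat_singleton '_' g
  have hql : ((l1 ++ PySem.List.pyRepeat ['_'] g ++ l2).length : Int)
      = (l1.length : Int) + max g 0 + l2.length := by
    rw [hrep]; push_cast [List.length_append, List.length_replicate]; omega
  set L1 := l1.length
  set L2 := l2.length
  set gN := g.toNat
  rw [hql]
  have hslice : PySem.List.slice seq (some i) (some (i + ((L1 : Int) + max g 0 + L2)))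
      = (seq.drop i.toNat).take (L1 + gN + L2) := by
    rw [PySem.List.slice_toNat _ h0 (by omega)]
    congr 1
    omega
  rw [hslice]
  have hw : ((seq.drop i.toNat).take (L1 + gN + L2)).length = L1 + gN + L2 := by
    rw [List.length_take, List.length_drop]; omega
  have hsplit : (seq.drop i.toNat).take (L1 + gN + L2)
      = (seq.drop i.toNat).take L1
        ++ ((seq.drop (i.toNat + L1)).take gN
        ++ (seq.drop (i.toNat + L1 + gN)).take L2) := by
    rw [show L1 + gN + L2 = L1 + (gN + L2) by omega, List.take_add, List.take_add]
    rw [List.drop_drop, List.drop_drop]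
  have hlen1 : ((seq.drop i.toNat).take L1).length = L1 := by
    rw [List.length_take, List.length_drop]; omega
  have hleng : ((seq.drop (i.toNat + L1)).take gN).length = gN := by
    rw [List.length_take, List.length_drop]; omega
  rw [mismatchesA_eq_cnt _ _ (by rw [hw, hrep]; simp [List.length_append, List.length_replicate]; omega)]
  rw [hsplit, hrep, List.append_assoc l1]
  rw [cnt_append _ _ _ _ (by rw [hlen1])]
  rw [cnt_append _ _ _ _ (by rw [hleng]; simp)]
  rw [cnt_gap]
  rw [profile_entry seq l1 i h0 (by omega)]
  rw [profile_entry seq l2 (i + ((L1 : Int) + max g 0 + L2) - L2) (by omega) (by omega)]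
  have e2 : (i + ((L1 : Int) + max g 0 + L2) - L2).toNat = i.toNat + L1 + gN := by omega
  rw [e2]
  ring

-- ===== VERDICT (by name: the statement is the Claim_ definition above) =====
theorem seq_search_spec : Claim_equal_seq_search := by
  intro sequence gap_min gap_max s1 s2 allowed_mismatch _
  unfold Spec_seq_search seq_search seq_search_alt
  simp only
  apply PySem.List.foldl_congr_mem
  intro acc g _
  have hql : ((s1.toList ++ PySem.List.pyRepeat ['_'] g ++ s2.toList).length : Int)
      = (s1.toList.length : Int) + max g 0 + s2.toList.length := by
    rw [PySem.List.pyRepeat_singleton]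
    push_cast [List.length_append, List.length_replicate]
    omega
  apply PySem.List.foldl_congr_mem
  intro acc' i hi
  have hi' := (PySem.List.mem_pyRange_one).mp hi
  rw [hql] at hi'
  have hv := mismatch_value_eq sequence.toList s1.toList s2.toList g i hi'.1 (by omega)
  rw [hv]
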